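-- pv_equiv track=rewrite | github.com/jeeseungbae/- | 프로그래머스/level2/멀리뛰기.py | solution
-- ===== SOURCE A (Python) =====
-- def solution(n):
--     answer = 0
--     num = n//2
--
--     for i in range(num+1):
--         ft=1
--         a = n-i*2
--         t = a+i
--         for x in range(t,0,-1):
--             ft=ft*x
--             if x <=i : ft = ft//x
--             if x <=a : ft = ft//x
--         answer = answer+ft
--
--     return answer%1234567
-- ===== SOURCE B (Python) =====
-- def solution(n):
--     if n < 0:
--         return 0
--     a, b = 0, 1
--     for _ in range(n):
--         a, b = b, (a + b) % 1234567
--     return b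
-- ===== Notes on version B (the rewrite author's own statement) =====
-- stated objective: faster
-- what changed: A sums binomial coefficients over all admissible step counts, computing each one by an inner factorial-product loop with repeated floor divisions; B replaces the whole double loop by the linear two-variable Fibonacci recurrence taken modulo the problem constant at every step.
import Mathlib
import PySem

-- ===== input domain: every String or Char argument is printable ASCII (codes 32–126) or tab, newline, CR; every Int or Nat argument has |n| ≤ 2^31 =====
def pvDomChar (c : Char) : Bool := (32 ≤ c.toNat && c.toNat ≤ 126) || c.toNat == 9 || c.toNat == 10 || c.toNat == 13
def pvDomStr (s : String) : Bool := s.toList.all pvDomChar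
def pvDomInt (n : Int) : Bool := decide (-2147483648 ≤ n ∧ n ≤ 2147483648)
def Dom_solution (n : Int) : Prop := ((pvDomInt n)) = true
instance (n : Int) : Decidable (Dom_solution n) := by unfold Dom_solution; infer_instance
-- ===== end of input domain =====

-- B replaces A's quadratic sum of factorial-built binomials by the linear Fibonacci recurrence mod 1234567 (objective: faster).

-- ===== PORT A =====
-- body of A's inner 'for x in range(t,0,-1)' loop
def pvStep (i a : Int) (ft x : Int) : Int :=
  let ft := ft * x
  let ft := if x ≤ i then PySem.Int.floordiv ft x else ft
  let ft := if x ≤ a then PySem.Int.floordiv ft x else ft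
  ft

def solution (n : Int) : Int :=
  let num := PySem.Int.floordiv n 2
  let answer := (PySem.List.pyRange 0 (num + 1) 1).foldl (fun answer i =>
      let a := n - i * 2
      let t := a + i
      let ft := (PySem.List.pyRange t 0 (-1)).foldl (pvStep i a) 1
      answer + ft) 0
  PySem.Int.mod answer 1234567

-- ===== PORT B =====
-- body of B's 'for _ in range(n)' loop: a, b = b, (a + b) % 1234567
def pvFibStep (p : Int × Int) (_ : Int) : Int × Int :=
  (p.2, PySem.Int.mod (p.1 + p.2) 1234567)

def solution_alt (n : Int) : Int :=
  if n < 0 then 0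
  else ((PySem.List.pyRange 0 n 1).foldl pvFibStep (0, 1)).2

-- ===== PRECONDITION & SPEC =====
def Spec_solution (n : Int) (out : Int) : Prop := out = solution_alt n
instance (n : Int) (out : Int) : Decidable (Spec_solution n out) := by unfold Spec_solution; infer_instance

-- ===== CLAIM (what is proved, stated in full; the proofs are below) =====
def Claim_equal_solution : Prop := ∀ (n : Int), Dom_solution n → Spec_solution n (solution n)

-- ===== LEMMAS AND PROOFS =====

-- A's inner-loop body divides by x once per satisfied condition, so it is symmetric in (i, a).
theorem pvStep_symm (i a : Int) : pvStep i a = pvStep a i := by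
  funext ft x
  by_cases hxi : x ≤ i <;> by_cases hxa : x ≤ a <;> simp [pvStep, hxi, hxa]

-- Stage 3 (x ≤ min i a): each step multiplies by x and divides twice; C * k! shrinks to C.
theorem pv_stage3 (k : Nat) : ∀ (i a : Int) (C : Nat), (k : Int) ≤ i → (k : Int) ≤ a →
    (PySem.List.pyRange (k : Int) 0 (-1)).foldl (pvStep i a) ((C * k.factorial : Nat) : Int)
      = (C : Int) := by
  induction k with
  | zero =>
    intro i a C _ _
    rw [PySem.List.pyRange_neg_one_eq_nil (by simp)]
    simp [Nat.factorial]
  | succ k ih =>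
    intro i a C hi ha
    rw [PySem.List.pyRange_neg_one_cons (by positivity)]
    have hstep : pvStep i a ((C * (k+1).factorial : Nat) : Int) ((k+1 : Nat) : Int)
        = ((C * k.factorial : Nat) : Int) := by
      have h1 : ((C * (k+1).factorial : Nat) : Int) * ((k+1 : Nat) : Int)
          = ((C * (k+1).factorial * (k+1) : Nat) : Int) := by push_cast; ring
      have h2 : PySem.Int.floordiv ((C * (k+1).factorial * (k+1) : Nat) : Int) ((k+1 : Nat) : Int)
          = ((C * (k+1).factorial : Nat) : Int) := by
        rw [PySem.Int.floordiv_natCast, Nat.mul_div_cancel _ (Nat.succ_pos k)]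
      have h3 : PySem.Int.floordiv ((C * (k+1).factorial : Nat) : Int) ((k+1 : Nat) : Int)
          = ((C * k.factorial : Nat) : Int) := by
        rw [PySem.Int.floordiv_natCast]
        congr 1
        rw [Nat.factorial_succ, show C * ((k+1) * k.factorial) = C * k.factorial * (k+1) by ring,
          Nat.mul_div_cancel _ (Nat.succ_pos k)]
      simp only [pvStep, h1, if_pos hi, h2, if_pos ha, h3]
    have hcast : ((k+1 : Nat) : Int) - 1 = ((k : Nat) : Int) := by push_cast; ring
    rw [List.foldl_cons, hstep, hcast]
    exact ih i a C (le_trans (by push_cast; omega) hi) (le_trans (by push_cast; omega) ha)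

-- Stage 2 (min i a < x ≤ max): multiply by x and divide once: the state C * i! is unchanged.
theorem pv_stage2 (d : Nat) : ∀ (i a C : Nat), i + d ≤ a →
    (PySem.List.pyRange ((i + d : Nat) : Int) 0 (-1)).foldl (pvStep (i : Int) (a : Int))
      ((C * i.factorial : Nat) : Int) = (C : Int) := by
  induction d with
  | zero =>
    intro i a C h
    simp only [Nat.add_zero] at *
    exact pv_stage3 i (i : Int) (a : Int) C (le_refl _) (by exact_mod_cast (by omega : i ≤ a))
  | succ d ih =>
    intro i a C h
    rw [show ((i + (d+1) : Nat) : Int) = ((i + d + 1 : Nat) : Int) by push_cast; ring]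
    rw [PySem.List.pyRange_neg_one_cons (by positivity)]
    have hstep : pvStep (i : Int) (a : Int) ((C * i.factorial : Nat) : Int) ((i + d + 1 : Nat) : Int)
        = ((C * i.factorial : Nat) : Int) := by
      have h1 : ((C * i.factorial : Nat) : Int) * ((i + d + 1 : Nat) : Int)
          = ((C * i.factorial * (i + d + 1) : Nat) : Int) := by push_cast; ring
      have hni : ¬ ((i + d + 1 : Nat) : Int) ≤ (i : Int) := by push_cast; omega
      have hya : ((i + d + 1 : Nat) : Int) ≤ (a : Int) := by
        have : i + d + 1 ≤ a := by omega
        exact_mod_cast this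
      have h2 : PySem.Int.floordiv ((C * i.factorial * (i + d + 1) : Nat) : Int) ((i + d + 1 : Nat) : Int)
          = ((C * i.factorial : Nat) : Int) := by
        rw [PySem.Int.floordiv_natCast, Nat.mul_div_cancel _ (by omega)]
      simp only [pvStep, h1, if_neg hni, if_pos hya, h2]
    have hcast : ((i + d + 1 : Nat) : Int) - 1 = ((i + d : Nat) : Int) := by push_cast; ring
    rw [List.foldl_cons, hstep, hcast]
    exact ih i a C (by omega)

-- Stage 1 (max i a < x ≤ t): pure multiplication, building the descending factorial.
theorem pv_stage1 (g : Nat) : ∀ (i a : Nat), g ≤ i → i ≤ a →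
    (PySem.List.pyRange ((a + g : Nat) : Int) 0 (-1)).foldl (pvStep (i : Int) (a : Int))
      (((a + i).descFactorial (i - g) : Nat) : Int) = ((a + i).choose i : Int) := by
  induction g with
  | zero =>
    intro i a _ hia
    have hd : (a + i).descFactorial i = (a + i).choose i * i.factorial := by
      rw [Nat.descFactorial_eq_factorial_mul_choose]; ring
    have h2 := pv_stage2 (a - i) i a ((a + i).choose i) (by omega)
    rw [show i + (a - i) = a by omega] at h2
    simp only [Nat.add_zero, Nat.sub_zero, hd]
    exact h2
  | succ g ih =>
    intro i a hgi hia
    rw [show ((a + (g+1) : Nat) : Int) = ((a + g + 1 : Nat) : Int) by push_cast; ring]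
    rw [PySem.List.pyRange_neg_one_cons (by positivity)]
    have hstep : pvStep (i : Int) (a : Int) (((a + i).descFactorial (i - (g+1)) : Nat) : Int)
        ((a + g + 1 : Nat) : Int) = (((a + i).descFactorial (i - g) : Nat) : Int) := by
      have hni : ¬ ((a + g + 1 : Nat) : Int) ≤ (i : Int) := by push_cast; omega
      have hna : ¬ ((a + g + 1 : Nat) : Int) ≤ (a : Int) := by push_cast; omega
      have h1 : (((a + i).descFactorial (i - (g+1)) : Nat) : Int) * ((a + g + 1 : Nat) : Int)
          = (((a + i).descFactorial (i - (g+1)) * (a + g + 1) : Nat) : Int) := by push_cast; ring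
      have h2 : (a + i).descFactorial (i - (g+1)) * (a + g + 1) = (a + i).descFactorial (i - g) := by
        rw [show i - g = (i - (g+1)) + 1 by omega, Nat.descFactorial_succ,
          show a + i - (i - (g+1)) = a + g + 1 by omega]
        ring
      simp only [pvStep, h1, if_neg hni, if_neg hna, h2]
    have hcast : ((a + g + 1 : Nat) : Int) - 1 = ((a + g : Nat) : Int) := by push_cast; ring
    rw [List.foldl_cons, hstep, hcast]
    exact ih i a (by omega) hia

-- A's inner loop on t = a + i (with i ≤ a) computes the binomial coefficient C(a+i, i).
theorem pv_inner_le (i a : Nat) (h : i ≤ a) :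
    (PySem.List.pyRange ((a + i : Nat) : Int) 0 (-1)).foldl (pvStep (i : Int) (a : Int)) 1
      = ((a + i).choose i : Int) := by
  have := pv_stage1 i i a (le_refl i) h
  simpa using this

-- …and for arbitrary i, a by symmetry of the loop body.
theorem pv_inner (i a : Nat) :
    (PySem.List.pyRange ((a + i : Nat) : Int) 0 (-1)).foldl (pvStep (i : Int) (a : Int)) 1
      = ((a + i).choose i : Int) := by
  by_cases h : i ≤ a
  · exact pv_inner_le i a h
  · have h' : a ≤ i := by omega
    have := pv_inner_le a i h'
    rw [pvStep_symm, show ((a + i : Nat) : Int) = ((i + a : Nat) : Int) by push_cast; ring,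
      show (a + i).choose i = (i + a).choose a by
        rw [Nat.add_comm a i]; exact (Nat.choose_symm_of_eq_add (by omega))]
    exact this

-- A's outer loop accumulates the partial sums of C(m-j, j).
theorem pv_outer (m : Nat) : ∀ (N : Nat), N ≤ m / 2 + 1 →
    (PySem.List.pyRange 0 ((N : Nat) : Int) 1).foldl (fun answer i =>
        answer + (PySem.List.pyRange ((m : Int) - i * 2 + i) 0 (-1)).foldl (pvStep i ((m : Int) - i * 2)) 1) 0
      = ((∑ j ∈ Finset.range N, (m - j).choose j : Nat) : Int) := by
  intro N
  induction N with
  | zero => intro _; rw [PySem.List.pyRange_one_eq_nil (by simp)]; simp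
  | succ N ih =>
    intro hN
    have h2N : 2 * N ≤ m := by omega
    rw [show ((N + 1 : Nat) : Int) = ((N : Nat) : Int) + 1 by push_cast; ring,
      PySem.List.pyRange_one_succ_right (by positivity), List.foldl_append, ih (by omega)]
    simp only [List.foldl_cons, List.foldl_nil]
    have ha : (m : Int) - (N : Int) * 2 = ((m - 2 * N : Nat) : Int) := by omega
    have ht : ((m - 2 * N : Nat) : Int) + ((N : Nat) : Int) = ((m - 2 * N + N : Nat) : Int) := by
      push_cast; ring
    rw [ha, ht, pv_inner N (m - 2 * N), show m - 2 * N + N = m - N by omega,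
      Finset.sum_range_succ]
    push_cast; ring

-- The truncated sum equals the full antidiagonal sum, which is fib (m+1).
theorem pv_sum_fib (m : Nat) :
    (∑ j ∈ Finset.range (m / 2 + 1), (m - j).choose j) = Nat.fib (m + 1) := by
  have hext : (∑ j ∈ Finset.range (m / 2 + 1), (m - j).choose j)
      = ∑ j ∈ Finset.range (m + 1), (m - j).choose j := by
    apply Finset.sum_subset
    · intro x hx
      simp only [Finset.mem_range] at hx ⊢
      omega
    · intro x _ hx
      simp only [Finset.mem_range] at hx
      apply Nat.choose_eq_zero_of_lt
      omega
  have hrefl : (∑ j ∈ Finset.range (m + 1), (m - j).choose j)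
      = ∑ j ∈ Finset.range (m + 1), j.choose (m - j) := by
    rw [← Finset.sum_range_reflect (fun j => j.choose (m - j)) (m + 1)]
    apply Finset.sum_congr rfl
    intro x hx
    simp only [Finset.mem_range] at hx
    rw [show m + 1 - 1 - x = m - x by omega, show m - (m - x) = x by omega]
  rw [hext, hrefl, Nat.fib_succ_eq_sum_choose, Finset.Nat.sum_antidiagonal_eq_sum_range_succ
    (fun a b => a.choose b)]

-- B's loop state after m iterations is (fib m % M, fib (m+1) % M).
theorem pv_fib_loop (m : Nat) :
    (PySem.List.pyRange 0 ((m : Nat) : Int) 1).foldl pvFibStep (0, 1)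
      = ((Nat.fib m : Int) % 1234567, (Nat.fib (m + 1) : Int) % 1234567) := by
  induction m with
  | zero => rw [PySem.List.pyRange_one_eq_nil (by simp)]; simp
  | succ m ih =>
    rw [show ((m + 1 : Nat) : Int) = ((m : Nat) : Int) + 1 by push_cast; ring,
      PySem.List.pyRange_one_succ_right (by positivity), List.foldl_append, ih]
    simp only [List.foldl_cons, List.foldl_nil, pvFibStep, Prod.mk.injEq]
    refine ⟨trivial, ?_⟩
    rw [PySem.Int.mod_eq_emod_of_pos (by norm_num), ← Int.add_emod]
    congr 1
    rw [show m + 1 + 1 = m + 2 by ring, Nat.fib_add_two]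
    push_cast; ring

-- ===== VERDICT (by name: the statement is the Claim_ definition above) =====
theorem solution_spec : Claim_equal_solution := by
  intro n _
  unfold Spec_solution solution solution_alt
  dsimp only
  cases n with
  | ofNat m =>
    rw [Int.ofNat_eq_natCast] at *
    rw [if_neg (by exact Int.not_lt.mpr (by positivity))]
    have hnum : PySem.Int.floordiv ((m : Nat) : Int) 2 = ((m / 2 : Nat) : Int) := by
      exact_mod_cast PySem.Int.floordiv_natCast m 2
    rw [hnum, show ((m / 2 : Nat) : Int) + 1 = ((m / 2 + 1 : Nat) : Int) by push_cast; ring]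
    rw [pv_outer m (m / 2 + 1) (le_refl _), pv_fib_loop m, pv_sum_fib m,
      PySem.Int.mod_eq_emod_of_pos (by norm_num)]
  | negSucc m =>
    rw [if_pos (by omega)]
    have hneg : PySem.Int.floordiv (Int.negSucc m) 2 + 1 ≤ 0 := by
      have := (PySem.Int.floordiv_lt_iff_lt_mul (a := Int.negSucc m) (b := 2) (q := 0) (by norm_num)).mpr (by omega)
      omega
    rw [PySem.List.pyRange_one_eq_nil hneg]
    rw [PySem.Int.mod_eq_emod_of_pos (by norm_num : (0:Int) < 1234567)]
    simp
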